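-- pv_equiv track=rewrite | github.com/VarunPius/PracticeProblems | Challenges/MicrosoftOA/LongestSubstringWithout3ContiguousOccurrencesOfLetter.py | longestWithout3
-- ===== SOURCE A (Python) =====
-- from itertools import groupby
--
-- def longestWithout3(S):
--     loc, ans = '', ''
--     for c, g in groupby(S):
--         glen = len(list(g))
--         ans = max([ans, loc + c * min(glen, 2)], key=len)
--         if glen > 2:
--             loc = c*2
--         else:
--             loc += c*glen
--     return ans
-- ===== SOURCE B (Python) =====
-- def longestWithout3(S):
--     window, best = '', ''
--     for ch in S:
--         if window.endswith(ch + ch):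
--             window = ch + ch
--         else:
--             window += ch
--         if len(window) > len(best):
--             best = window
--     return best
-- ===== Notes on version B (the rewrite author's own statement) =====
-- stated objective: simpler
-- what changed: Replaced the groupby-over-runs pass (run lengths, c*min(glen,2) candidates, loc reset rule) by a direct per-character sliding-window scan: the window resets to the last two equal characters when a third would repeat, and best is updated on strictly greater length.
import Mathlib
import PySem

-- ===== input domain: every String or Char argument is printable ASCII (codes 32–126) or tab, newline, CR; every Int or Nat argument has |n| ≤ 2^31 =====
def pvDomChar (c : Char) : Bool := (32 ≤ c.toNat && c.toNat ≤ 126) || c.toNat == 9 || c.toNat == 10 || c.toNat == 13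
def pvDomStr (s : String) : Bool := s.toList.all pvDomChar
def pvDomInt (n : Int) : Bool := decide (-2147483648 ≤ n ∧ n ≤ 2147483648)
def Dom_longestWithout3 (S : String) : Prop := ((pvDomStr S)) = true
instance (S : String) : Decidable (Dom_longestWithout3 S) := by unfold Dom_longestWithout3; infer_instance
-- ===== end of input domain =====

-- B replaces A's groupby-over-runs pass by a direct per-character sliding-window scan; objective: simpler.

-- ===== PORT A =====
-- itertools.groupby over a list of chars, as (char, run length) pairs
def pvRunsOf : List Char → List (Char × Nat)
  | [] => []
  | c :: rest =>
      (c, (rest.takeWhile (· == c)).length + 1) :: pvRunsOf (rest.dropWhile (· == c))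
  termination_by l => l.length
  decreasing_by
    simp only [List.length_cons]
    exact Nat.lt_succ_of_le (List.length_dropWhile_le _ _)

-- one groupby iteration of A's loop body on state (loc, ans)
def pvStepA (st : List Char × List Char) (g : Char × Nat) : List Char × List Char :=
  -- ans = max([ans, loc + c*min(glen,2)], key=len): first-wins, so update only on strictly greater length
  let cand := st.1 ++ List.replicate (min g.2 2) g.1
  let ans' := if st.2.length < cand.length then cand else st.2
  let loc' := if g.2 > 2 then List.replicate 2 g.1 else st.1 ++ List.replicate g.2 g.1
  (loc', ans')

def longestWithout3 (S : String) : String :=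
  String.ofList ((pvRunsOf S.toList).foldl pvStepA ([], [])).2

-- ===== PORT B =====
-- window.endswith(ch + ch)
def pvEndsCC (loc : List Char) (c : Char) : Bool :=
  match loc.reverse with
  | c1 :: c2 :: _ => c1 == c && c2 == c
  | _ => false

-- one character of B's loop on state (window, best)
def pvStepB (st : List Char × List Char) (c : Char) : List Char × List Char :=
  let w := if pvEndsCC st.1 c then [c, c] else st.1 ++ [c]
  (w, if st.2.length < w.length then w else st.2)

def longestWithout3_alt (S : String) : String :=
  String.ofList (S.toList.foldl pvStepB ([], [])).2

-- ===== PRECONDITION & SPEC =====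
def Spec_longestWithout3 (S : String) (out : String) : Prop := out = longestWithout3_alt S
instance (S : String) (out : String) : Decidable (Spec_longestWithout3 S out) := by unfold Spec_longestWithout3; infer_instance

-- ===== CLAIM (what is proved, stated in full; the proofs are below) =====
def Claim_equal_longestWithout3 : Prop := ∀ (S : String), Dom_longestWithout3 S → Spec_longestWithout3 S (longestWithout3 S)

-- ===== LEMMAS AND PROOFS =====

theorem pvEndsCC_false {loc : List Char} {c : Char} (h : loc.getLast? ≠ some c) :
    pvEndsCC loc c = false := by
  unfold pvEndsCC
  rcases hr : loc.reverse with _ | ⟨c1, _ | ⟨c2, t⟩⟩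
  · rfl
  · rfl
  · have : loc.getLast? = some c1 := by
      rw [← List.head?_reverse, hr]; rfl
    simp only [Bool.and_eq_false_iff]
    left
    simp only [beq_eq_false_iff_ne, ne_eq]
    intro hc; exact h (by rw [this, hc])

theorem pvEndsCC_append_one {loc : List Char} {c : Char} (h : loc.getLast? ≠ some c) :
    pvEndsCC (loc ++ [c]) c = false := by
  unfold pvEndsCC
  rcases hr : loc.reverse with _ | ⟨c1, t⟩
  · simp [List.reverse_append, hr]
  · have hlast : loc.getLast? = some c1 := by
      rw [← List.head?_reverse, hr]; rfl
    have : (loc ++ [c]).reverse = c :: c1 :: t := by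
      simp [List.reverse_append, hr]
    rw [this]
    simp only [Bool.and_eq_false_iff]
    right
    simp only [beq_eq_false_iff_ne, ne_eq]
    intro hc; exact h (by rw [hlast, hc])

theorem pvEndsCC_append_two (loc : List Char) (c : Char) :
    pvEndsCC (loc ++ [c, c]) c = true := by
  unfold pvEndsCC
  have : (loc ++ [c, c]).reverse = c :: c :: loc.reverse := by
    simp
  rw [this]
  simp

-- while the window is already [c,c] and best has length ≥ 2, further c's change nothing
theorem foldB_cc (c : Char) (k : Nat) (best : List Char) (hb : 2 ≤ best.length) :
    (List.replicate k c).foldl pvStepB ([c, c], best) = ([c, c], best) := by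
  induction k with
  | zero => rfl
  | succ k ih =>
      rw [List.replicate_succ, List.foldl_cons]
      have hstep : pvStepB ([c, c], best) c = ([c, c], best) := by
        unfold pvStepB
        have hcc : pvEndsCC [c, c] c = true := by
          unfold pvEndsCC; simp
        simp only [hcc, if_true]
        rw [if_neg (by simp only [List.length_cons, List.length_nil]; omega)]
      rw [hstep, ih]

-- one run of glen ≥ 1 equal characters under B equals one groupby step of A,
-- provided the window does not already end in that character
theorem foldB_run (c : Char) (glen : Nat) (hg : 1 ≤ glen) (loc best : List Char)
    (hloc : loc.getLast? ≠ some c) :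
    (List.replicate glen c).foldl pvStepB (loc, best) = pvStepA (loc, best) (c, glen) := by
  have h1 : pvStepB (loc, best) c =
      (loc ++ [c], if best.length < (loc ++ [c]).length then loc ++ [c] else best) := by
    unfold pvStepB
    simp [pvEndsCC_false hloc]
  match glen, hg with
  | 1, _ =>
      simp only [List.replicate_one, List.foldl_cons, List.foldl_nil, h1]
      unfold pvStepA
      simp
  | (k+2), _ =>
      set best1 := if best.length < (loc ++ [c]).length then loc ++ [c] else best with hbest1
      have h2 : pvStepB (loc ++ [c], best1) c =
          (loc ++ [c, c], if best.length < loc.length + 2 then loc ++ [c, c] else best) := by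
        unfold pvStepB
        rw [pvEndsCC_append_one hloc, if_neg Bool.false_ne_true]
        have hx : (loc ++ [c]) ++ [c] = loc ++ [c, c] := by simp
        rw [hx, Prod.mk.injEq]
        refine ⟨rfl, ?_⟩
        have hlen2 : (loc ++ [c, c]).length = loc.length + 2 := by simp
        rw [hlen2, hbest1]
        by_cases hB : best.length < (loc ++ [c]).length
        · rw [if_pos hB]
          have hlen1 : (loc ++ [c]).length = loc.length + 1 := by simp
          rw [hlen1] at hB
          rw [hlen1, if_pos (by omega), if_pos (by omega)]
        · rw [if_neg hB]
      set best2 := if best.length < loc.length + 2 then loc ++ [c, c] else best with hbest2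
      have hb2 : 2 ≤ best2.length := by
        rw [hbest2]
        split
        · simp
        · simp only [not_lt] at *; omega
      have hrep : List.replicate (k + 2) c = c :: c :: List.replicate k c := by
        simp [List.replicate_succ]
      rw [hrep, List.foldl_cons, h1, List.foldl_cons, h2]
      match k with
      | 0 =>
          simp only [List.replicate, List.foldl_nil]
          simp only [pvStepA, Nat.min_self]
          rw [Prod.mk.injEq]
          constructor
          · rw [if_neg (by omega)]
            simp [List.replicate_succ]
          · rw [hbest2]
            have h2' : (loc ++ List.replicate 2 c).length = loc.length + 2 := by simp
            rw [h2']
            split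
            · simp [List.replicate_succ]
            · rfl
      | (m+1) =>
          have hcc : pvStepB (loc ++ [c, c], best2) c = ([c, c], best2) := by
            unfold pvStepB
            simp only [pvEndsCC_append_two, if_true]
            rw [if_neg (by simp only [List.length_cons, List.length_nil]; omega)]
          rw [show List.replicate (m+1) c = c :: List.replicate m c from List.replicate_succ ..,
            List.foldl_cons, hcc, foldB_cc c m best2 hb2]
          simp only [pvStepA]
          rw [Prod.mk.injEq]
          constructor
          · rw [if_pos (by omega)]
            simp [List.replicate_succ]
          · rw [hbest2]
            have hmin : min (m + 1 + 2) 2 = 2 := by omega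
            rw [hmin]
            have h2' : (loc ++ List.replicate 2 c).length = loc.length + 2 := by simp
            rw [h2']
            split
            · simp [List.replicate_succ]
            · rfl

theorem takeWhile_eq_replicate (c : Char) (l : List Char) :
    l.takeWhile (· == c) = List.replicate (l.takeWhile (· == c)).length c := by
  rw [List.eq_replicate_iff]
  refine ⟨rfl, fun b hb => ?_⟩
  have := List.mem_takeWhile_imp hb
  simpa using this

theorem head_dropWhile_ne (c : Char) (l : List Char) {c' : Char}
    (h : (l.dropWhile (· == c)).head? = some c') : c' ≠ c := by
  intro hc
  have := List.head?_dropWhile_not (· == c) l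
  rw [h, hc] at this
  simp at this

theorem foldAB : ∀ (n : Nat) (l : List Char), l.length ≤ n →
    ∀ (loc best : List Char), (∀ c, l.head? = some c → loc.getLast? ≠ some c) →
    l.foldl pvStepB (loc, best) = (pvRunsOf l).foldl pvStepA (loc, best) := by
  intro n
  induction n with
  | zero =>
      intro l hl loc best _
      have : l = [] := List.length_eq_zero_iff.mp (Nat.le_zero.mp hl)
      subst this; simp [pvRunsOf]
  | succ n ih =>
      intro l hl loc best hhead
      match l with
      | [] => simp [pvRunsOf]
      | c :: rest =>
          have hloc : loc.getLast? ≠ some c := hhead c rfl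
          set t := rest.takeWhile (· == c) with ht
          set d := rest.dropWhile (· == c) with hd
          have hsplit : c :: rest = List.replicate (t.length + 1) c ++ d := by
            have : rest = t ++ d := (List.takeWhile_append_dropWhile).symm
            rw [List.replicate_succ, List.cons_append, ← takeWhile_eq_replicate, ← this]
          have hruns : pvRunsOf (c :: rest) = (c, t.length + 1) :: pvRunsOf d := by
            rw [pvRunsOf]
          have hdlen : d.length ≤ n := by
            have h1 : d.length ≤ rest.length := List.length_dropWhile_le _ _
            simp only [List.length_cons] at hl
            omega
          rw [hruns]
          rw [show (c :: rest) = List.replicate (t.length + 1) c ++ d from hsplit]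
          rw [List.foldl_append, foldB_run c (t.length + 1) (by omega) loc best hloc,
            List.foldl_cons]
          rcases hA : pvStepA (loc, best) (c, t.length + 1) with ⟨loc', best'⟩
          have hloc' : loc'.getLast? = some c := by
            have : loc' = (pvStepA (loc, best) (c, t.length + 1)).1 := by rw [hA]
            rw [this]
            unfold pvStepA
            simp only
            split
            · simp [List.replicate_succ]
            · rw [show List.replicate (t.length + 1) c
                  = List.replicate t.length c ++ [c] from List.replicate_succ' ..]
              rw [← List.append_assoc, List.getLast?_append]
              rfl
          exact ih d hdlen loc' best' (fun c' hc' => by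
            rw [hloc']
            intro hEq
            exact head_dropWhile_ne c rest hc' (Option.some.inj hEq).symm)

-- ===== VERDICT (by name: the statement is the Claim_ definition above) =====
theorem longestWithout3_spec : Claim_equal_longestWithout3 := by
  intro S _
  unfold Spec_longestWithout3 longestWithout3 longestWithout3_alt
  rw [foldAB S.toList.length S.toList le_rfl [] [] (by intro c h; simp)]
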